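-- pv_equiv track=rewrite | github.com/prki/Follow_the_white_rabbit | white_rabbit.py | sort_on_word_probability
-- ===== SOURCE A (Python) =====
-- def sort_on_word_probability(words, anagram):
--     """ Sorts the words in a non-increasing sequence based on two factors:
--         * The amount of total symbols in the word
--         * The weight of these symbols (weight is based on occurence frequency
--           in the anagram).
--
--     This is done in order to first traverse words which are more likely to
--     be the solution - as the words which contain many rare symbols are
--     likelier to be a part of the solution than others - as well as words
--     which are longer, rather than the ones which are short.
--     """
--     symbols_weights = {'p': 200,
--                        'o': 125,
--                        'u': 125,
--                        'l': 200,
--                        't': 50,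
--                        'r': 200,
--                        'y': 200,
--                        'w': 200,
--                        'i': 200,
--                        's': 125,
--                        'a': 200,
--                        'n': 200}
--     lst = []
--     for word in words:
--         symbols_in_word = set(word)
--         word_weight = 0
--         for symbol in symbols_in_word:
--             cnt = word.count(symbol)
--             word_weight += symbols_weights[symbol] * cnt
--         lst.append((word, word_weight))
--
--     lst.sort(key=lambda x: x[1], reverse=True)
--
--     ret = []
--     for word in lst:
--         ret.append(word[0])
--
--     return ret
-- ===== SOURCE B (Python) =====
-- def sort_on_word_probability(words, anagram):
--     """Same ordering as A: sort words by descending character-frequency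
--     weight, stable.  The weight of a word is computed in one linear pass
--     (sum of per-character weights) and the words are sorted directly,
--     with no intermediate (word, weight) pair list and no projection."""
--     symbols_weights = {'p': 200,
--                        'o': 125,
--                        'u': 125,
--                        'l': 200,
--                        't': 50,
--                        'r': 200,
--                        'y': 200,
--                        'w': 200,
--                        'i': 200,
--                        's': 125,
--                        'a': 200,
--                        'n': 200}
--     return sorted(words,
--                   key=lambda word: sum(symbols_weights[c] for c in word),
--                   reverse=True)
-- ===== Notes on version B (the rewrite author's own statement) =====
-- stated objective: simpler
-- what changed: B computes each word's weight in one linear pass (sum of per-character weights) and sorts the words directly with sorted(key=..., reverse=True), removing A's set/count inner loops, the intermediate (word, weight) pair list and the final projection loop.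
import Mathlib
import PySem

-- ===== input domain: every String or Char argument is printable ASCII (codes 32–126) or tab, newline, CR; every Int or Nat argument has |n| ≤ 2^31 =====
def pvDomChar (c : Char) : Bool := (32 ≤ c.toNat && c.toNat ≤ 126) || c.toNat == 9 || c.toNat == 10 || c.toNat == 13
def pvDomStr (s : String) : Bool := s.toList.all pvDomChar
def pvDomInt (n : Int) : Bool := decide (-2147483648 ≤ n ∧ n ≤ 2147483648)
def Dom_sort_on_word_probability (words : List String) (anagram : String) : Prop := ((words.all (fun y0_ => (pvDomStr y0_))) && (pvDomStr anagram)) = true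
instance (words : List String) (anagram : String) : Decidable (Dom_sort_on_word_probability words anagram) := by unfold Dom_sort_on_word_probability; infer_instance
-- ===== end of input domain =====

-- B sorts the words directly with a single-pass per-word weight (sum of the
-- per-character weights), instead of A's set/count inner loops, intermediate
-- (word, weight) pair list and final projection: simpler, same ordering.

-- ===== PORT A =====
def pvSymbolsWeights : PySem.Dict Char Int :=
  PySem.Dict.ofList [('p', 200), ('o', 125), ('u', 125), ('l', 200), ('t', 50),
                     ('r', 200), ('y', 200), ('w', 200), ('i', 200), ('s', 125),
                     ('a', 200), ('n', 200)]

-- A raises KeyError when a word contains a character outside the table;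
-- those inputs are excluded by Pre_, and the lookup is ported as getD … 0 there.
def sort_on_word_probability (words : List String) (anagram : String) : List String :=
  let lst : List (String × Int) :=
    words.foldl (fun lst word =>
      let symbols_in_word : PySem.Set Char := PySem.Set.ofList word.toList
      let word_weight : Int :=
        symbols_in_word.foldl (fun word_weight symbol =>
          let cnt : Int := (PySem.List.count word.toList symbol : Int)
          word_weight + pvSymbolsWeights.getD symbol 0 * cnt) 0
      lst ++ [(word, word_weight)]) []
  let lst := PySem.List.sorted lst (fun x => x.2) true
  lst.foldl (fun ret word => ret ++ [word.1]) []

-- ===== PORT B =====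
-- sum(symbols_weights[c] for c in word); KeyError excluded by Pre_ (getD … 0)
def pvWordWeight (word : String) : Int :=
  (word.toList.map (fun c => pvSymbolsWeights.getD c 0)).sum

def sort_on_word_probability_alt (words : List String) (anagram : String) : List String :=
  PySem.List.sorted words pvWordWeight true

-- ===== PRECONDITION & SPEC =====
-- Pre_ excludes exactly the inputs on which A (and B alike) raises KeyError:
-- a word containing a character outside the 12-key weight table.
def Pre_sort_on_word_probability (words : List String) (anagram : String) : Prop :=
  (words.all (fun w => w.toList.all
    (fun c => ['p','o','u','l','t','r','y','w','i','s','a','n'].contains c))) = true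

instance (words : List String) (anagram : String) : Decidable (Pre_sort_on_word_probability words anagram) := by
  unfold Pre_sort_on_word_probability; infer_instance

def pvWitness_sort_on_word_probability : List String × String := (["pool", "top", "sir"], "poultry")

def Spec_sort_on_word_probability (words : List String) (anagram : String) (out : List String) : Prop := out = sort_on_word_probability_alt words anagram
instance (words : List String) (anagram : String) (out : List String) : Decidable (Spec_sort_on_word_probability words anagram out) := by unfold Spec_sort_on_word_probability; infer_instance

-- ===== CLAIM (what is proved, stated in full; the proofs are below) =====
def Claim_equal_sort_on_word_probability : Prop := ∀ (words : List String) (anagram : String), Dom_sort_on_word_probability words anagram → Pre_sort_on_word_probability words anagram → Spec_sort_on_word_probability words anagram (sort_on_word_probability words anagram)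

-- ===== LEMMAS AND PROOFS =====

-- A's per-word weight (over the distinct symbols, weight × count) equals B's
-- one-pass sum of per-character weights.
theorem pv_weight_eq (word : String) :
    (PySem.Set.ofList word.toList).foldl (fun word_weight symbol =>
        word_weight + pvSymbolsWeights.getD symbol 0
          * (PySem.List.count word.toList symbol : Int)) 0
      = pvWordWeight word := by
  rw [PySem.List.foldl_add]
  have hset : (PySem.Set.ofList word.toList : List Char) = PySem.List.dedup word.toList :=
    (PySem.List.dedup_eq_ofList word.toList).symm
  rw [hset]
  simp only [PySem.List.count_eq, pvWordWeight]
  set l := word.toList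
  set f : Char → Int := fun c => pvSymbolsWeights.getD c 0 with hf
  have h1 : (PySem.List.dedup l).toFinset = l.toFinset := by ext c; simp
  rw [show (fun c => f c * ((List.count c l : Nat) : Int)) =
        (fun c => f c * (l.count c : Int)) from rfl]
  rw [← List.sum_toFinset _ (PySem.List.nodup_dedup l), h1, Finset.sum_list_map_count]
  simp [mul_comm]

-- stable insertion commutes with tagging each word with its weight
theorem pv_insertBy_map (x : String) (ys : List String) :
    PySem.List.insertBy (fun a b : String × Int => decide (b.2 < a.2))
        (x, pvWordWeight x) (ys.map (fun w => (w, pvWordWeight w)))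
      = (PySem.List.insertBy (fun a b => decide (pvWordWeight b < pvWordWeight a)) x ys).map
          (fun w => (w, pvWordWeight w)) := by
  induction ys with
  | nil => simp [PySem.List.insertBy]
  | cons y ys ih =>
    simp only [List.map_cons, PySem.List.insertBy]
    split <;> simp_all

theorem pv_sort_fold_map (ws : List String) (acc : List String) :
    ws.foldl (fun acc x => PySem.List.insertBy
        (fun a b : String × Int => decide (b.2 < a.2)) (x, pvWordWeight x) acc)
        (acc.map (fun w => (w, pvWordWeight w)))
      = (ws.foldl (fun acc x => PySem.List.insertBy
          (fun a b => decide (pvWordWeight b < pvWordWeight a)) x acc) acc).map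
          (fun w => (w, pvWordWeight w)) := by
  induction ws generalizing acc with
  | nil => rfl
  | cons w ws ih =>
    simp only [List.foldl_cons]
    rw [pv_insertBy_map, ih]

-- ===== VERDICT (by name: the statement is the Claim_ definition above) =====
theorem sort_on_word_probability_spec : Claim_equal_sort_on_word_probability := by
  intro words anagram _ _
  show _ = _
  unfold sort_on_word_probability sort_on_word_probability_alt
  simp only [PySem.List.foldl_append_singleton_eq_map, List.nil_append]
  have hmap : words.map (fun word =>
      (word, (PySem.Set.ofList word.toList).foldl (fun word_weight symbol =>
        word_weight + pvSymbolsWeights.getD symbol 0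
          * (PySem.List.count word.toList symbol : Int)) 0))
      = words.map (fun w => (w, pvWordWeight w)) := by
    apply List.map_congr_left; intro w _; rw [pv_weight_eq]
  rw [hmap, PySem.List.sorted_rev_eq_foldl_insertBy, PySem.List.sorted_rev_eq_foldl_insertBy]
  rw [List.foldl_map]
  have := pv_sort_fold_map words []
  simp only [List.map_nil] at this
  rw [this, List.map_map,
      show (Prod.fst ∘ fun w : String => (w, pvWordWeight w)) = id from rfl, List.map_id]
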